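-- pv_equiv track=rewrite | github.com/omriz/coding_questions | 427.py | _valid_loop
-- ===== SOURCE A (Python) =====
-- import typing
--
-- def _valid_loop(loop: typing.List[int], elevations: typing.Dict[int, int]) -> bool:
--     if len(loop) <= 1:
--         return False
--     going_up = True
--     for i in range(1, len(loop)):
--         if elevations[loop[i]] > elevations[loop[i - 1]]:
--             if not going_up:
--                 return False
--         elif elevations[loop[i]] < elevations[loop[i - 1]]:
--             if going_up:
--                 going_up = False
--     return True
-- ===== SOURCE B (Python) =====
-- import typing
--
-- def _valid_loop(loop: typing.List[int], elevations: typing.Dict[int, int]) -> bool: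
--     n = len(loop)
--     if n <= 1:
--         return False
--     i = 1
--     while i < n and elevations[loop[i]] >= elevations[loop[i - 1]]:
--         i += 1
--     while i < n and elevations[loop[i]] <= elevations[loop[i - 1]]:
--         i += 1
--     return i == n
-- ===== Notes on version B (the rewrite author's own statement) =====
-- stated objective: simpler
-- what changed: Replaces the boolean-flag state machine with a two-phase index walk: advance while non-decreasing, then while non-increasing, and succeed iff the end of the loop is reached.
-- outside the precondition, e.g. on _valid_loop([1, 2, 1, 2, 9], {1: 0, 2: 1}): A returns False, B returns False
import Mathlib
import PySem

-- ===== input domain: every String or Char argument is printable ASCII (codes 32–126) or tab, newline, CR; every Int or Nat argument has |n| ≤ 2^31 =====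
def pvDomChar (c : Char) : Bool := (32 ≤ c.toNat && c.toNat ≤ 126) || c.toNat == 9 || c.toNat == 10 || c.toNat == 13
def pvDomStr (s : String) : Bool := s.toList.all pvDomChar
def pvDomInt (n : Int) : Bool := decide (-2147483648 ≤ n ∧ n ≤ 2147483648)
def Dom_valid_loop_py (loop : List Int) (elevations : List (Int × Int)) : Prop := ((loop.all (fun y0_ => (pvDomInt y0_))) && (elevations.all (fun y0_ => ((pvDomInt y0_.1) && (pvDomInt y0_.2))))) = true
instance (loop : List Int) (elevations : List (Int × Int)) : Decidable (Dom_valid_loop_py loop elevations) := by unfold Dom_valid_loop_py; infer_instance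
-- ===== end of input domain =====

-- B replaces A's boolean-flag state machine by a two-phase index walk (climb while non-decreasing, then run down while non-increasing) — simpler decomposition, same cost.

-- ===== PORT A =====
-- elevations[loop[i]] : dict lookup (first match) after list index; shared by both ports verbatim
def pvElev (elevations : List (Int × Int)) (loop : List Int) (i : Nat) : Int :=
  ((elevations.find? (fun p => p.1 == (PySem.List.pyGet? loop (i : Int)).getD 0)).map Prod.snd).getD 0

def pvGoA (elevations : List (Int × Int)) (loop : List Int) (going_up : Bool) : List Nat → Bool
  | [] => true
  | i :: rest =>
    if pvElev elevations loop i > pvElev elevations loop (i - 1) then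
      if !going_up then false else pvGoA elevations loop going_up rest
    else if pvElev elevations loop i < pvElev elevations loop (i - 1) then
      pvGoA elevations loop false rest
    else
      pvGoA elevations loop going_up rest

def valid_loop_py (loop : List Int) (elevations : List (Int × Int)) : Bool :=
  if loop.length ≤ 1 then false
  else pvGoA elevations loop true (List.range' 1 (loop.length - 1))

-- ===== PORT B =====
-- while i < n and elevations[loop[i]] >= elevations[loop[i-1]]: i += 1   (fuel = n - i)
def pvClimb (elevations : List (Int × Int)) (loop : List Int) : Nat → Nat → Nat
  | i, 0 => i
  | i, fuel + 1 =>
    if pvElev elevations loop i ≥ pvElev elevations loop (i - 1) then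
      pvClimb elevations loop (i + 1) fuel
    else i

-- while i < n and elevations[loop[i]] <= elevations[loop[i-1]]: i += 1   (fuel = n - i)
def pvDescend (elevations : List (Int × Int)) (loop : List Int) : Nat → Nat → Nat
  | i, 0 => i
  | i, fuel + 1 =>
    if pvElev elevations loop i ≤ pvElev elevations loop (i - 1) then
      pvDescend elevations loop (i + 1) fuel
    else i

def valid_loop_py_alt (loop : List Int) (elevations : List (Int × Int)) : Bool :=
  let n := loop.length
  if n ≤ 1 then false
  else
    let i := pvClimb elevations loop 1 (n - 1)
    decide (pvDescend elevations loop i (n - i) = n)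

-- ===== PRECONDITION & SPEC =====
-- Pre_ excludes inputs where some loop element is missing from elevations (Python KeyError); it is
-- slightly narrower than A's raise set: when an early `return False` fires before the missing key is
-- reached, A (and B) still return False, but such inputs are excluded here.
def Pre_valid_loop_py (loop : List Int) (elevations : List (Int × Int)) : Prop :=
  loop.length ≤ 1 ∨ ∀ x ∈ loop, (elevations.find? (fun p => p.1 == x)).isSome

instance (loop : List Int) (elevations : List (Int × Int)) : Decidable (Pre_valid_loop_py loop elevations) := by
  unfold Pre_valid_loop_py; infer_instance

def pvWitness_valid_loop_py : List Int × (List (Int × Int)) := ([0, 1, 0], [(0, 0), (1, 5)])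

def Spec_valid_loop_py (loop : List Int) (elevations : List (Int × Int)) (out : Bool) : Prop := out = valid_loop_py_alt loop elevations
instance (loop : List Int) (elevations : List (Int × Int)) (out : Bool) : Decidable (Spec_valid_loop_py loop elevations out) := by unfold Spec_valid_loop_py; infer_instance

-- ===== CLAIM (what is proved, stated in full; the proofs are below) =====
def Claim_equal_valid_loop_py : Prop := ∀ (loop : List Int) (elevations : List (Int × Int)), Dom_valid_loop_py loop elevations → Pre_valid_loop_py loop elevations → Spec_valid_loop_py loop elevations (valid_loop_py loop elevations)

-- ===== LEMMAS AND PROOFS =====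

theorem pvGoA_false_eq (elevations : List (Int × Int)) (loop : List Int) (n : Nat) :
    ∀ (k j : Nat), j + k = n →
      pvGoA elevations loop false (List.range' j k) = decide (pvDescend elevations loop j k = n) := by
  intro k
  induction k with
  | zero =>
    intro j hj
    simp [pvGoA, pvDescend]; omega
  | succ k ih =>
    intro j hj
    by_cases h1 : pvElev elevations loop j > pvElev elevations loop (j - 1)
    · have hL : pvGoA elevations loop false (List.range' j (k + 1)) = false := by
        rw [List.range'_succ]; simp [pvGoA, if_pos h1]
      have hR : pvDescend elevations loop j (k + 1) = j := by
        simp only [pvDescend]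
        rw [if_neg (show ¬ pvElev elevations loop j ≤ pvElev elevations loop (j - 1) by omega)]
      rw [hL, hR]; simp; omega
    · have hL : pvGoA elevations loop false (List.range' j (k + 1)) =
          pvGoA elevations loop false (List.range' (j + 1) k) := by
        rw [List.range'_succ]; simp only [pvGoA]
        rw [if_neg h1]; split <;> rfl
      have hR : pvDescend elevations loop j (k + 1) = pvDescend elevations loop (j + 1) k := by
        simp only [pvDescend]
        rw [if_pos (show pvElev elevations loop j ≤ pvElev elevations loop (j - 1) by omega)]
      rw [hL]; simp only [hR]
      exact ih (j + 1) (by omega)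

theorem pvGoA_true_eq (elevations : List (Int × Int)) (loop : List Int) (n : Nat) :
    ∀ (k j : Nat), j + k = n →
      pvGoA elevations loop true (List.range' j k) =
        decide (pvDescend elevations loop (pvClimb elevations loop j k)
                  (n - pvClimb elevations loop j k) = n) := by
  intro k
  induction k with
  | zero =>
    intro j hj
    have hjn : j = n := by omega
    subst hjn
    simp [pvGoA, pvClimb, pvDescend]
  | succ k ih =>
    intro j hj
    by_cases h1 : pvElev elevations loop j > pvElev elevations loop (j - 1)
    · have hL : pvGoA elevations loop true (List.range' j (k + 1)) =
          pvGoA elevations loop true (List.range' (j + 1) k) := by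
        rw [List.range'_succ]; simp [pvGoA, if_pos h1]
      have hC : pvClimb elevations loop j (k + 1) = pvClimb elevations loop (j + 1) k := by
        simp only [pvClimb]
        rw [if_pos (show pvElev elevations loop j ≥ pvElev elevations loop (j - 1) by omega)]
      rw [hL]; simp only [hC]
      exact ih (j + 1) (by omega)
    · by_cases h2 : pvElev elevations loop j < pvElev elevations loop (j - 1)
      · have hL : pvGoA elevations loop true (List.range' j (k + 1)) =
            pvGoA elevations loop false (List.range' (j + 1) k) := by
          rw [List.range'_succ]; simp only [pvGoA]
          rw [if_neg h1, if_pos h2]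
        have hC : pvClimb elevations loop j (k + 1) = j := by
          simp only [pvClimb]
          rw [if_neg (show ¬ pvElev elevations loop j ≥ pvElev elevations loop (j - 1) by omega)]
        have hnj : n - j = k + 1 := by omega
        have hD : pvDescend elevations loop j (k + 1) = pvDescend elevations loop (j + 1) k := by
          simp only [pvDescend]
          rw [if_pos (show pvElev elevations loop j ≤ pvElev elevations loop (j - 1) by omega)]
        rw [hL]; simp only [hC, hnj, hD]
        exact pvGoA_false_eq elevations loop n k (j + 1) (by omega)
      · have hL : pvGoA elevations loop true (List.range' j (k + 1)) =
            pvGoA elevations loop true (List.range' (j + 1) k) := by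
          rw [List.range'_succ]; simp only [pvGoA]
          rw [if_neg h1, if_neg h2]
        have hC : pvClimb elevations loop j (k + 1) = pvClimb elevations loop (j + 1) k := by
          simp only [pvClimb]
          rw [if_pos (show pvElev elevations loop j ≥ pvElev elevations loop (j - 1) by omega)]
        rw [hL]; simp only [hC]
        exact ih (j + 1) (by omega)

-- ===== VERDICT (by name: the statement is the Claim_ definition above) =====
theorem valid_loop_py_spec : Claim_equal_valid_loop_py := by
  intro loop elevations _ _
  unfold Spec_valid_loop_py valid_loop_py valid_loop_py_alt
  by_cases h : loop.length ≤ 1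
  · simp [h]
  · rw [if_neg h, if_neg h]
    exact pvGoA_true_eq elevations loop loop.length (loop.length - 1) 1 (by omega)
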